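-- pv_equiv track=rewrite | github.com/avocado-framework/avocado-vt | virttest/qemu_vm.py | process_info_block
-- ===== SOURCE A (Python) =====
-- def process_info_block(blocks_info):
--     """
--     Process the info block, so that can deal with the new and old
--     qemu format.
--
--     :param blocks_info: the output of qemu command
--                         'info block'
--     """
--     block_list = []
--     block_entry = []
--
--     if not isinstance(blocks_info, (str, bytes)):
--         return block_list
--
--     for block in blocks_info.splitlines():
--         if block:
--             block_entry.append(block.strip())
--         else:
--             block_list.append(' '.join(block_entry))
--             block_entry = []
--     # don't forget the last one
--     block_list.append(' '.join(block_entry))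
--     return block_list
-- ===== SOURCE B (Python) =====
-- def process_info_block(blocks_info):
--     if not isinstance(blocks_info, (str, bytes)):
--         return []
--     lines = blocks_info.splitlines()
--     entries = []
--     while True:
--         try:
--             i = lines.index('')
--         except ValueError:
--             entries.append(' '.join(l.strip() for l in lines))
--             return entries
--         entries.append(' '.join(l.strip() for l in lines[:i]))
--         lines = lines[i + 1:]
-- ===== Notes on version B (the rewrite author's own statement) =====
-- stated objective: alternative
-- what changed: Replaces A's single accumulate-and-flush pass with repeated list.index search for the next blank line, slicing off and joining the stripped segment before it and looping on the remainder.
import Mathlib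
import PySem

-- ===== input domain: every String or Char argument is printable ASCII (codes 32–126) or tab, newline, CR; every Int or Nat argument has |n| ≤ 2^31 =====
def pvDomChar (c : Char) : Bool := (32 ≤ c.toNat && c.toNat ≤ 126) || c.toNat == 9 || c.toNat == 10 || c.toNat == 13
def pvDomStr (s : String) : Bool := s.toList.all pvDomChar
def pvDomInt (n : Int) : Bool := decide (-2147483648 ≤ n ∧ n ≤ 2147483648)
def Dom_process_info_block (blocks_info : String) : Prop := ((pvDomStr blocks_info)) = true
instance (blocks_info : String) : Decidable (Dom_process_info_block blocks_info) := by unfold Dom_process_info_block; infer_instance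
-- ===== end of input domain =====

-- B replaces A's accumulate-and-flush pass with repeated find-first-blank-line + slice; alternative decomposition, same cost.


-- ===== PORT A =====
-- literal port of A: fold over splitlines carrying (block_list, block_entry); the isinstance guard is
-- vacuous for a String argument
def process_info_block (blocks_info : String) : List String :=
  let st := (PySem.Str.splitlines blocks_info).foldl
    (fun (st : List String × List String) (block : String) =>
      if block ≠ "" then (st.1, st.2 ++ [PySem.Str.strip block])
      else (st.1 ++ [PySem.Str.join " " st.2], []))
    ([], [])
  st.1 ++ [PySem.Str.join " " st.2]

-- ===== PORT B =====
-- Source B's while-loop: find first '' with lines.index(''); lines[:i] is take i and lines[i+1:] is drop (i+1),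
-- exact here since 0 ≤ i < len(lines)
def pibLoop (lines entries : List String) : List String :=
  match h : PySem.List.index? lines "" with
  | none => entries ++ [PySem.Str.join " " (lines.map PySem.Str.strip)]
  | some i =>
      pibLoop (lines.drop (i + 1))
        (entries ++ [PySem.Str.join " " ((lines.take i).map PySem.Str.strip)])
termination_by lines.length
decreasing_by
  obtain ⟨hk, -, -⟩ := PySem.List.getElem_of_index?_eq_some h
  simp only [List.length_drop]; omega

def process_info_block_alt (blocks_info : String) : List String :=
  pibLoop (PySem.Str.splitlines blocks_info) []

-- ===== PRECONDITION & SPEC =====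
def Spec_process_info_block (blocks_info : String) (out : List String) : Prop := out = process_info_block_alt blocks_info
instance (blocks_info : String) (out : List String) : Decidable (Spec_process_info_block blocks_info out) := by unfold Spec_process_info_block; infer_instance

-- ===== CLAIM (what is proved, stated in full; the proofs are below) =====
def Claim_equal_process_info_block : Prop := ∀ (blocks_info : String), Dom_process_info_block blocks_info → Spec_process_info_block blocks_info (process_info_block blocks_info)

-- ===== LEMMAS AND PROOFS =====

-- reference: the blank-separated groups of stripped lines
def pibGrp : List String → List (List String)
  | [] => [[]]
  | l :: ls =>
      if l = "" then [] :: pibGrp ls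
      else match pibGrp ls with
           | g :: gs => (PySem.Str.strip l :: g) :: gs
           | [] => [[PySem.Str.strip l]]

theorem pibGrp_ne_nil (ls : List String) : pibGrp ls ≠ [] := by
  cases ls with
  | nil => simp [pibGrp]
  | cons l ls =>
      simp only [pibGrp]
      split_ifs
      · simp
      · cases pibGrp ls <;> simp

theorem pibGrp_no_blank (ls : List String) (h : "" ∉ ls) :
    pibGrp ls = [ls.map PySem.Str.strip] := by
  induction ls with
  | nil => simp [pibGrp]
  | cons l ls ih =>
      simp only [List.mem_cons, not_or] at h
      simp [pibGrp, Ne.symm h.1, ih h.2]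

theorem pibGrp_split (pre suf : List String) (h : "" ∉ pre) :
    pibGrp (pre ++ "" :: suf) = (pre.map PySem.Str.strip) :: pibGrp suf := by
  induction pre with
  | nil => simp [pibGrp]
  | cons p pre ih =>
      simp only [List.mem_cons, not_or] at h
      simp [pibGrp, Ne.symm h.1, ih h.2]

theorem foldlA_eq (lines : List String) :
    ∀ (acc entry : List String) (g : List String) (gs : List (List String)),
      pibGrp lines = g :: gs →
      (let st := lines.foldl
          (fun (st : List String × List String) (block : String) =>
            if block ≠ "" then (st.1, st.2 ++ [PySem.Str.strip block])
            else (st.1 ++ [PySem.Str.join " " st.2], []))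
          (acc, entry)
       st.1 ++ [PySem.Str.join " " st.2])
      = acc ++ (PySem.Str.join " " (entry ++ g)) :: gs.map (PySem.Str.join " ") := by
  induction lines with
  | nil =>
      intro acc entry g gs hg
      simp only [pibGrp] at hg
      cases hg
      simp
  | cons l ls ih =>
      intro acc entry g gs hg
      by_cases hl : l = ""
      · subst hl
        simp only [pibGrp] at hg
        obtain ⟨g' , gs', hgs⟩ : ∃ g' gs', pibGrp ls = g' :: gs' := by
          cases h : pibGrp ls with
          | nil => exact absurd h (pibGrp_ne_nil ls)
          | cons a b => exact ⟨a, b, rfl⟩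
        rw [hgs] at hg
        cases hg
        simp only [List.foldl_cons, ne_eq, not_true_eq_false, if_false]
        rw [ih (acc ++ [PySem.Str.join " " entry]) [] g' gs' hgs]
        simp
      · simp only [pibGrp, if_neg hl] at hg
        obtain ⟨g' , gs', hgs⟩ : ∃ g' gs', pibGrp ls = g' :: gs' := by
          cases h : pibGrp ls with
          | nil => exact absurd h (pibGrp_ne_nil ls)
          | cons a b => exact ⟨a, b, rfl⟩
        rw [hgs] at hg
        injection hg with h1 h2
        subst h1; subst h2
        simp only [List.foldl_cons, ne_eq, hl, not_false_iff, if_true]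
        rw [ih acc (entry ++ [PySem.Str.strip l]) g' gs' hgs]
        simp

theorem pibLoop_eq (n : Nat) : ∀ (lines : List String), lines.length ≤ n →
    ∀ (entries : List String),
      pibLoop lines entries = entries ++ (pibGrp lines).map (PySem.Str.join " ") := by
  induction n with
  | zero =>
      intro lines hlen entries
      have hnil : lines = [] := List.eq_nil_of_length_eq_zero (Nat.le_zero.mp hlen)
      subst hnil
      rw [pibLoop]
      split
      · simp [pibGrp]
      · next i h => rw [PySem.List.index?_eq_some_iff] at h; obtain ⟨pre, suf, hsplit, -, -⟩ := h; simp at hsplit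
  | succ n ih =>
      intro lines hlen entries
      rw [pibLoop]
      split
      · next h =>
          have hnm : "" ∉ lines := by rw [PySem.List.index?_eq_none_iff] at h; exact h
          simp [pibGrp_no_blank lines hnm]
      · next i h =>
          rw [PySem.List.index?_eq_some_iff] at h
          obtain ⟨pre, suf, hsplit, hilen, hpre⟩ := h
          subst hsplit
          have htake : (pre ++ "" :: suf).take i = pre := by
            rw [← hilen]; simp
          have hdrop : (pre ++ "" :: suf).drop (i + 1) = suf := by
            rw [← hilen, show pre ++ "" :: suf = (pre ++ [""]) ++ suf by simp,
              show pre.length + 1 = (pre ++ [""]).length by simp, List.drop_left]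
          have hsuf : suf.length ≤ n := by
            simp only [List.length_append, List.length_cons] at hlen; omega
          rw [htake, hdrop, ih suf hsuf _]
          rw [pibGrp_split pre suf hpre]
          simp

-- ===== VERDICT (by name: the statement is the Claim_ definition above) =====
theorem process_info_block_spec : Claim_equal_process_info_block := by
  intro s _
  unfold Spec_process_info_block process_info_block process_info_block_alt
  obtain ⟨g, gs, hg⟩ : ∃ g gs, pibGrp (PySem.Str.splitlines s) = g :: gs := by
    cases h : pibGrp (PySem.Str.splitlines s) with
    | nil => exact absurd h (pibGrp_ne_nil _)
    | cons a b => exact ⟨a, b, rfl⟩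
  rw [pibLoop_eq (PySem.Str.splitlines s).length _ le_rfl, hg,
    foldlA_eq (PySem.Str.splitlines s) [] [] g gs hg]
  simp
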